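-- pv_equiv track=rewrite | github.com/WallisonCarlos/SimEDaPE | python/src/util/map.py | get_links_labels_indexs
-- ===== SOURCE A (Python) =====
-- def get_links_labels_indexs(neighbors, labels, labels_indexs):
--     neighbor_labels = []
--     neighbor_indexs = []
--     for neighbor in neighbors:
--         for label in labels:
--             if str(neighbor)+'-' in label:
--                 neighbor_indexs.append(labels_indexs[label])
--                 neighbor_labels.append(neighbor)
--                 break
--     return neighbors, neighbor_indexs
-- ===== SOURCE B (Python) =====
-- def get_links_labels_indexs(neighbors, labels, labels_indexs):
--     # Two-phase: compute the first matching label's index once per DISTINCT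
--     # neighbor, then map the neighbor list through the table.
--     first = {}
--     for n in dict.fromkeys(neighbors):
--         pat = str(n) + '-'
--         hit = next((l for l in labels if pat in l), None)
--         if hit is not None:
--             first[n] = labels_indexs[hit]
--     return neighbors, [first[n] for n in neighbors if n in first]
-- ===== Notes on version B (the rewrite author's own statement) =====
-- stated objective: faster
-- what changed: B replaces A's per-neighbor nested scan by a two-phase scheme: it builds a table mapping each DISTINCT neighbor to the index of its first matching label (so duplicate neighbors are searched only once), then maps the neighbor list through the table.
import Mathlib
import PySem

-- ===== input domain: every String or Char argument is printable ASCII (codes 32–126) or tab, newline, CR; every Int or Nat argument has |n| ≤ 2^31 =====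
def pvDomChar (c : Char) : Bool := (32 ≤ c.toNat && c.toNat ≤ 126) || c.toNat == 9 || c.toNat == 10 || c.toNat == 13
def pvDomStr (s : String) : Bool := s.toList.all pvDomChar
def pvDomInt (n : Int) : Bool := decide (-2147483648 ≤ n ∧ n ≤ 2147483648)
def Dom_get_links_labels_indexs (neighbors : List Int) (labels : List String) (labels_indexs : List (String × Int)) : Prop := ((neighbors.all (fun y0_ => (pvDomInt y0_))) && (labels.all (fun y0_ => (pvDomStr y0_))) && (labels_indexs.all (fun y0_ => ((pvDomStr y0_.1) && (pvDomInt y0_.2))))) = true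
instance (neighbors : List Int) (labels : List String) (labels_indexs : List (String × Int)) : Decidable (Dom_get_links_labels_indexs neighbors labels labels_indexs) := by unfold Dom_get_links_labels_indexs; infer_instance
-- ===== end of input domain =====

-- B computes each distinct neighbor's first matching label once (a memo table), then maps
-- the neighbor list through the table — an alternative decomposition of A's nested scan.


-- ===== PORT A =====
-- inner 'for label in labels: … break' loop of A; the dict lookup labels_indexs[label]
-- is ported with .lookup (first match) and getD 0 — Pre_ excludes the KeyError inputs,
-- so the default is never reached inside Pre_.
def pvLoopA (labels_indexs : List (String × Int)) (neighbor : Int) (st : List Int × List Int) : List String → List Int × List Int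
  | [] => st
  | label :: rest =>
    if PySem.Str.isIn (PySem.Int.toStr neighbor ++ "-") label then
      (st.1 ++ [neighbor], st.2 ++ [(labels_indexs.lookup label).getD 0])
    else pvLoopA labels_indexs neighbor st rest

def get_links_labels_indexs (neighbors : List Int) (labels : List String) (labels_indexs : List (String × Int)) : List Int × List Int :=
  let st := neighbors.foldl (fun st neighbor => pvLoopA labels_indexs neighbor st labels) ([], [])
  (neighbors, st.2)

-- ===== PORT B =====
def get_links_labels_indexs_alt (neighbors : List Int) (labels : List String) (labels_indexs : List (String × Int)) : List Int × List Int :=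
  let first : PySem.Dict Int Int :=
    (PySem.List.dedup neighbors).foldl (fun f n =>
      let pat := PySem.Int.toStr n ++ "-"
      match labels.find? (fun l => PySem.Str.isIn pat l) with
      | some hit => f.insert n ((labels_indexs.lookup hit).getD 0)
      | none => f) PySem.Dict.empty
  (neighbors, neighbors.filterMap (fun n => first.get? n))

-- ===== PRECONDITION & SPEC =====
-- Pre_ excludes exactly the inputs on which Python A raises KeyError: some neighbor's
-- first matching label is not a key of labels_indexs (B raises KeyError there too).
def Pre_get_links_labels_indexs (neighbors : List Int) (labels : List String) (labels_indexs : List (String × Int)) : Prop :=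
  ∀ n ∈ neighbors, ∀ l ∈ labels,
    labels.find? (fun l => PySem.Str.isIn (PySem.Int.toStr n ++ "-") l) = some l →
    (labels_indexs.lookup l).isSome
instance (neighbors : List Int) (labels : List String) (labels_indexs : List (String × Int)) : Decidable (Pre_get_links_labels_indexs neighbors labels labels_indexs) := by unfold Pre_get_links_labels_indexs; infer_instance
def pvWitness_get_links_labels_indexs : List Int × List String × (List (String × Int)) :=
  ([3, 7, 3], ["7-x", "ab", "3-y"], [("3-y", 2), ("7-x", 5)])

def Spec_get_links_labels_indexs (neighbors : List Int) (labels : List String) (labels_indexs : List (String × Int)) (out : List Int × List Int) : Prop := out = get_links_labels_indexs_alt neighbors labels labels_indexs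
instance (neighbors : List Int) (labels : List String) (labels_indexs : List (String × Int)) (out : List Int × List Int) : Decidable (Spec_get_links_labels_indexs neighbors labels labels_indexs out) := by unfold Spec_get_links_labels_indexs; infer_instance

-- ===== CLAIM (what is proved, stated in full; the proofs are below) =====
def Claim_equal_get_links_labels_indexs : Prop := ∀ (neighbors : List Int) (labels : List String) (labels_indexs : List (String × Int)), Dom_get_links_labels_indexs neighbors labels labels_indexs → Pre_get_links_labels_indexs neighbors labels labels_indexs → Spec_get_links_labels_indexs neighbors labels labels_indexs (get_links_labels_indexs neighbors labels labels_indexs)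

-- ===== LEMMAS AND PROOFS =====

-- the per-neighbor result both programs compute: index of the first matching label
def pvRes (labels : List String) (labels_indexs : List (String × Int)) (n : Int) : Option Int :=
  (labels.find? (fun l => PySem.Str.isIn (PySem.Int.toStr n ++ "-") l)).map
    (fun l => (labels_indexs.lookup l).getD 0)

theorem pvLoopA_eq (labels_indexs : List (String × Int)) (n : Int) (st : List Int × List Int) (labels : List String) :
    pvLoopA labels_indexs n st labels =
      match pvRes labels labels_indexs n with
      | some v => (st.1 ++ [n], st.2 ++ [v])
      | none => st := by
  induction labels with
  | nil => rfl
  | cons l rest ih =>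
    by_cases h : PySem.Str.isIn (PySem.Int.toStr n ++ "-") l = true
    · have h2 : PySem.Chars.isIn (PySem.Int.toChars n ++ ['-']) l.toList = true := by
        simpa using h
      simp [pvLoopA, pvRes, h2]
    · have h2 : PySem.Chars.isIn (PySem.Int.toChars n ++ ['-']) l.toList = false := by
        simpa using h
      simp [pvLoopA, ih, pvRes, h2]

theorem pvFoldA_snd (labels : List String) (labels_indexs : List (String × Int)) (neighbors : List Int) (st : List Int × List Int) :
    (neighbors.foldl (fun st n => pvLoopA labels_indexs n st labels) st).2 =
      st.2 ++ neighbors.filterMap (pvRes labels labels_indexs) := by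
  induction neighbors generalizing st with
  | nil => simp
  | cons n rest ih =>
    rw [List.foldl_cons, pvLoopA_eq]
    cases h : pvRes labels labels_indexs n with
    | none => simp [ih, h]
    | some v => simp [ih, h]

-- one step of B's table-building fold
def pvStep (labels : List String) (labels_indexs : List (String × Int)) (f : PySem.Dict Int Int) (n : Int) : PySem.Dict Int Int :=
  match labels.find? (fun l => PySem.Str.isIn (PySem.Int.toStr n ++ "-") l) with
  | some hit => f.insert n ((labels_indexs.lookup hit).getD 0)
  | none => f

-- the step keeps every stored value correct, and stores the correct value at its key
theorem pvStep_get (labels : List String) (labels_indexs : List (String × Int)) (f : PySem.Dict Int Int) (d : Int)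
    (hf : ∀ m : Int, ∀ v, f.get? m = some v → pvRes labels labels_indexs m = some v) (m : Int) :
    (pvStep labels labels_indexs f d).get? m =
      if m = d then pvRes labels labels_indexs d else f.get? m := by
  cases hfind : labels.find? (fun l => PySem.Str.isIn (PySem.Int.toStr d ++ "-") l) with
  | none =>
    have hres : pvRes labels labels_indexs d = none := by rw [pvRes, hfind]; rfl
    simp only [pvStep, hfind]
    by_cases hmd : m = d
    · subst hmd
      cases hfd : f.get? m with
      | none => rw [if_pos rfl, hres]
      | some v => rw [hf m v hfd] at hres; cases hres
    · rw [if_neg hmd]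
  | some hit =>
    have hres : pvRes labels labels_indexs d = some ((labels_indexs.lookup hit).getD 0) := by
      rw [pvRes, hfind]; rfl
    simp only [pvStep, hfind]
    rw [PySem.Dict.get?_insert, hres]

theorem pvStep_sound (labels : List String) (labels_indexs : List (String × Int)) (f : PySem.Dict Int Int) (d : Int)
    (hf : ∀ m : Int, ∀ v, f.get? m = some v → pvRes labels labels_indexs m = some v) :
    ∀ m : Int, ∀ v, (pvStep labels labels_indexs f d).get? m = some v → pvRes labels labels_indexs m = some v := by
  intro m v h
  rw [pvStep_get labels labels_indexs f d hf] at h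
  split_ifs at h with hmd
  · subst hmd; exact h
  · exact hf m v h

-- once the table stores pvRes n, further steps keep it
theorem pvFold_preserves (labels : List String) (labels_indexs : List (String × Int)) (ds : List Int) (f : PySem.Dict Int Int) (n : Int)
    (hn : f.get? n = pvRes labels labels_indexs n)
    (hf : ∀ m : Int, ∀ v, f.get? m = some v → pvRes labels labels_indexs m = some v) :
    (ds.foldl (pvStep labels labels_indexs) f).get? n = pvRes labels labels_indexs n := by
  induction ds generalizing f with
  | nil => simpa using hn
  | cons d rest ih =>
    rw [List.foldl_cons]
    refine ih _ ?_ (pvStep_sound labels labels_indexs f d hf)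
    rw [pvStep_get labels labels_indexs f d hf]
    split_ifs with hnd
    · subst hnd; rfl
    · exact hn

-- the memo table of B: on every processed neighbor it stores exactly pvRes
theorem pvTable_get (labels : List String) (labels_indexs : List (String × Int)) (ds : List Int) (f : PySem.Dict Int Int)
    (hf : ∀ m : Int, ∀ v, f.get? m = some v → pvRes labels labels_indexs m = some v) :
    ∀ n ∈ ds,
      (ds.foldl (pvStep labels labels_indexs) f).get? n = pvRes labels labels_indexs n := by
  induction ds generalizing f with
  | nil => simp
  | cons d rest ih =>
    intro n hn
    rw [List.foldl_cons]
    rw [List.mem_cons] at hn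
    rcases hn with rfl | hn'
    · exact pvFold_preserves labels labels_indexs rest _ n
        (by rw [pvStep_get labels labels_indexs f n hf, if_pos rfl])
        (pvStep_sound labels labels_indexs f n hf)
    · exact ih _ (pvStep_sound labels labels_indexs f d hf) n hn'

-- ===== VERDICT (by name: the statement is the Claim_ definition above) =====
theorem get_links_labels_indexs_spec : Claim_equal_get_links_labels_indexs := by
  intro neighbors labels labels_indexs _ _
  unfold Spec_get_links_labels_indexs get_links_labels_indexs get_links_labels_indexs_alt
  simp only
  refine Prod.ext rfl ?_
  rw [pvFoldA_snd]
  simp only [List.nil_append]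
  refine (List.filterMap_congr ?_).symm
  intro n hn
  have hstepeq : (fun (f : PySem.Dict Int Int) (n : Int) =>
      let pat := PySem.Int.toStr n ++ "-"
      match labels.find? (fun l => PySem.Str.isIn pat l) with
      | some hit => f.insert n ((labels_indexs.lookup hit).getD 0)
      | none => f) = pvStep labels labels_indexs := rfl
  rw [hstepeq]
  exact pvTable_get labels labels_indexs (PySem.List.dedup neighbors) PySem.Dict.empty
    (by intro m v h; rw [PySem.Dict.get?_empty] at h; cases h)
    n (by simpa [PySem.List.mem_dedup] using hn)
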